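-- pv_equiv track=rewrite | github.com/git4lhe/lhe-algorithm | 카카오기출문제/신규아이디_추천.py | step34
-- ===== SOURCE A (Python) =====
-- def step34(x):
--     a = ""
--     for i in range(len(x)):
--         if x[i] == x[i - 1] and x[i] == '.':
--             continue
--         a += x[i]
--
--     if len(a) and a[0] == '.':
--         a = a[1:]
--     if len(a) and a[-1] == '.':
--         a = a[:-1]
--
--     return a
-- ===== SOURCE B (Python) =====
-- def step34(x):
--     return ".".join(p for p in x.split(".") if p)
-- ===== Notes on version B (the rewrite author's own statement) =====
-- stated objective: idiomatic
-- what changed: Replaces the index loop (with wraparound previous-char comparison) plus two end-strips by a split-on-dot / drop-empty-segments / rejoin pipeline; the C-level split/join also makes it measurably faster.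
import Mathlib
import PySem

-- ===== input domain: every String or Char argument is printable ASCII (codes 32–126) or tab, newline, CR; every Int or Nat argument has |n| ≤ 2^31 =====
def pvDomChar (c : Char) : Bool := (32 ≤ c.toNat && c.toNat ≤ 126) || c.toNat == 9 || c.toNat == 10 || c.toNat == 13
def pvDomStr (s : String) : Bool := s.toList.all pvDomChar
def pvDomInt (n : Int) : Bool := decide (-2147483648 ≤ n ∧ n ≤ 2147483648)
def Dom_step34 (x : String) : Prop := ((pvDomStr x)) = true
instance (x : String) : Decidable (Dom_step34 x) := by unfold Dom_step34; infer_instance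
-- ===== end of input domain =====

-- B replaces A's index loop (with wraparound previous-char comparison) and two end-strips
-- by an idiomatic split-on-dot / drop-empty-segments / rejoin pipeline; same return value
-- (a timing run measured B faster by a constant factor).

-- ===== PORT A =====
def step34 (x : String) : String :=
  let cs := x.toList
  let a : List Char := (PySem.List.pyRange 0 (cs.length : Int) 1).foldl
    (fun a i =>
      if PySem.List.pyGetD cs i ' ' = PySem.List.pyGetD cs (i - 1) ' ' ∧
         PySem.List.pyGetD cs i ' ' = '.' then a
      else a ++ [PySem.List.pyGetD cs i ' ']) []
  let a1 := if a.length ≠ 0 ∧ PySem.List.pyGetD a 0 ' ' = '.'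
    then PySem.List.slice a (some 1) none else a
  let a2 := if a1.length ≠ 0 ∧ PySem.List.pyGetD a1 (-1) ' ' = '.'
    then PySem.List.slice a1 none (some (-1)) else a1
  String.ofList a2

-- ===== PORT B =====
def step34_alt (x : String) : String :=
  PySem.Str.join "."
    (((PySem.Str.split? x ".").getD []).filter (fun p => decide (p ≠ "")))

-- ===== PRECONDITION & SPEC =====
def Spec_step34 (x : String) (out : String) : Prop := out = step34_alt x
instance (x : String) (out : String) : Decidable (Spec_step34 x out) := by unfold Spec_step34; infer_instance

-- ===== CLAIM (what is proved, stated in full; the proofs are below) =====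
def Claim_equal_step34 : Prop := ∀ (x : String), Dom_step34 x → Spec_step34 x (step34 x)

-- ===== LEMMAS AND PROOFS =====

-- split on '.' (the behaviour of PySem.Chars.splitOn · ['.'])
def split1 : List Char → List (List Char)
  | [] => [[]]
  | c :: r => if c = '.' then [] :: split1 r else
      match split1 r with
      | [] => [[c]]
      | h :: t => (c :: h) :: t

-- the collapse loop of A, abstracted over "previous char was a dot"
def collD : Bool → List Char → List Char
  | _, [] => []
  | b, c :: r => if b = true ∧ c = '.' then collD true r else c :: collD (c == '.') r

def stripL : List Char → List Char
  | [] => []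
  | c :: r => if c = '.' then r else c :: r

def stripR (l : List Char) : List Char := if l.getLast? = some '.' then l.dropLast else l

def dropDots (l : List Char) : List Char := l.dropWhile (fun c => c == '.')

def wordsOf (l : List Char) : List (List Char) := (split1 l).filter (fun p => p ≠ [])

def jn : List (List Char) → List Char
  | [] => []
  | [w] => w
  | w :: ws => w ++ '.' :: jn ws

lemma split1_ne_nil (l : List Char) : split1 l ≠ [] := by
  cases l with
  | nil => simp [split1]
  | cons c r =>
    by_cases h : c = '.' <;> simp [split1, h]
    cases split1 r <;> simp

lemma go_spec (l : List Char) : ∀ (fuel : Nat) (cur : List Char) (acc : List (List Char)),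
    l.length < fuel →
    PySem.Chars.splitOn.go ['.'] fuel l cur acc
      = acc.reverse ++ ((split1 l).modifyHead (fun h => cur.reverse ++ h)) := by
  induction l with
  | nil =>
    intro fuel cur acc hf
    cases fuel with
    | zero => omega
    | succ m => simp [PySem.Chars.splitOn.go, split1]
  | cons c r ih =>
    intro fuel cur acc hf
    cases fuel with
    | zero => simp at hf
    | succ m =>
      by_cases h : c = '.'
      · subst h
        rw [show PySem.Chars.splitOn.go ['.'] (m+1) ('.' :: r) cur acc
              = PySem.Chars.splitOn.go ['.'] m r [] (cur.reverse :: acc) by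
            simp [PySem.Chars.splitOn.go, List.isPrefixOf]]
        rw [ih m [] (cur.reverse :: acc) (by simpa using hf)]
        rcases hs : split1 r with _ | ⟨h0, t⟩
        · exact absurd hs (split1_ne_nil r)
        · simp [split1, hs]
      · rw [show PySem.Chars.splitOn.go ['.'] (m+1) (c :: r) cur acc
              = PySem.Chars.splitOn.go ['.'] m r (c :: cur) acc by
            simp only [PySem.Chars.splitOn.go, List.isPrefixOf]
            simp [Ne.symm h]]
        rw [ih m (c :: cur) acc (by simpa using hf)]
        rcases hs : split1 r with _ | ⟨h0, t⟩
        · exact absurd hs (split1_ne_nil r)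
        · simp [split1, hs, h]

lemma splitOn_eq_split1 (l : List Char) : PySem.Chars.splitOn l ['.'] = split1 l := by
  have := go_spec l (l.length + 1) [] [] (by omega)
  rcases hs : split1 l with _ | ⟨h0, t⟩
  · exact absurd hs (split1_ne_nil l)
  · simpa [PySem.Chars.splitOn, hs] using this

lemma collD_false_cons (c : Char) (r : List Char) :
    collD false (c :: r) = c :: collD (c == '.') r := by
  simp [collD]

lemma collD_true_dot (r : List Char) : collD true ('.' :: r) = collD true r := by
  simp [collD]

lemma collD_true_eq (l : List Char) : collD true l = collD false (dropDots l) := by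
  induction l with
  | nil => simp [dropDots, collD]
  | cons c r ih =>
    by_cases h : c = '.'
    · subst h; simpa [collD, dropDots] using ih
    · simp [collD, dropDots, h]

lemma head_dropDots (l : List Char) (c : Char) (r : List Char)
    (h : dropDots l = c :: r) : c ≠ '.' := by
  induction l with
  | nil => simp [dropDots] at h
  | cons a t ih =>
    by_cases ha : a = '.'
    · exact ih (by simpa [dropDots, ha] using h)
    · simp [dropDots, ha] at h
      intro hc; exact ha (h.1.symm ▸ hc)

lemma stripL_collD (b : Bool) (l : List Char) :
    stripL (collD b l) = collD false (dropDots l) := by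
  cases l with
  | nil => cases b <;> simp [collD, stripL, dropDots]
  | cons c r =>
    by_cases h : c = '.'
    · subst h
      have hkey : stripL (collD false (dropDots r)) = collD false (dropDots r) := by
        rcases hd : dropDots r with _ | ⟨d, m⟩
        · simp [collD, stripL]
        · rw [collD_false_cons]
          simp [stripL, head_dropDots r d m hd]
      cases b with
      | false =>
        simp only [collD, dropDots, List.dropWhile]
        simpa [stripL, collD_true_eq, dropDots] using hkey
      | true =>
        simp only [collD, dropDots, List.dropWhile]
        simpa [collD_true_eq, dropDots] using hkey
    · simp [collD, stripL, dropDots, h]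

lemma words_dot (r : List Char) : wordsOf ('.' :: r) = wordsOf r := by
  simp [wordsOf, split1]

lemma words_dropDots (l : List Char) : wordsOf (dropDots l) = wordsOf l := by
  induction l with
  | nil => simp [dropDots]
  | cons c r ih =>
    by_cases h : c = '.'
    · subst h; rw [words_dot]; simpa [dropDots] using ih
    · simp [dropDots, h]

lemma stripR_cons (c : Char) (Y : List Char) (h : Y ≠ []) :
    stripR (c :: Y) = c :: stripR Y := by
  obtain ⟨d, Y', rfl⟩ := List.exists_cons_of_ne_nil h
  simp only [stripR, List.getLast?_cons_cons, List.dropLast_cons₂]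
  split <;> rfl

lemma jn_cons_head (c : Char) (w : List Char) (ws : List (List Char)) :
    jn ((c :: w) :: ws) = c :: jn (w :: ws) := by
  cases ws <;> simp [jn]

lemma collD_false_ne_nil (c : Char) (r : List Char) : collD false (c :: r) ≠ [] := by
  simp [collD]

lemma split1_cons_ne (c : Char) (r : List Char) (h : c ≠ '.') :
    ∃ h0 t, split1 r = h0 :: t ∧ split1 (c :: r) = (c :: h0) :: t := by
  rcases hs : split1 r with _ | ⟨h0, t⟩
  · exact absurd hs (split1_ne_nil r)
  · exact ⟨h0, t, rfl, by simp [split1, h, hs]⟩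

-- CORE: on a list with no leading dot, stripping one trailing dot from the collapse
-- yields the dot-join of the nonempty segments.
lemma core : ∀ (n : Nat) (l : List Char), l.length ≤ n → l.head? ≠ some '.' →
    stripR (collD false l) = jn (wordsOf l) := by
  intro n
  induction n with
  | zero =>
    intro l hn _
    have : l = [] := by cases l <;> simp_all
    subst this; simp [collD, stripR, wordsOf, split1, jn]
  | succ n ih =>
    intro l hn hh
    cases l with
    | nil => simp [collD, stripR, wordsOf, split1, jn]
    | cons c r =>
      have hc : c ≠ '.' := by simpa using hh
      cases r with
      | nil =>
        simp [collD, stripR, wordsOf, split1, jn, hc]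
      | cons c' r' =>
        by_cases hc' : c' = '.'
        · -- l = c :: '.' :: r'
          subst hc'
          have hm : (dropDots r').length ≤ n := by
            have := List.length_dropWhile_le (fun c => c == '.') r'
            simp only [dropDots]; simp at hn; omega
          have hmh : (dropDots r').head? ≠ some '.' := by
            rcases hd : dropDots r' with _ | ⟨d, m⟩
            · simp
            · simpa using head_dropDots r' d m hd
          have hIH := ih (dropDots r') hm hmh
          have hwords : wordsOf (c :: '.' :: r') = [c] :: wordsOf (dropDots r') := by
            rcases hs : split1 r' with _ | ⟨h0, t⟩
            · exact absurd hs (split1_ne_nil r')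
            · rw [words_dropDots]
              simp [wordsOf, split1, hc, hs]
          rw [collD_false_cons]
          rw [show collD (c == '.') ('.' :: r') = '.' :: collD true r' by
            simp [collD, hc]]
          rw [collD_true_eq, hwords]
          rcases hd : dropDots r' with _ | ⟨d, m⟩
          · simp [collD, stripR, wordsOf, split1, jn]
          · have hdne : d ≠ '.' := head_dropDots r' d m hd
            rw [hd] at hIH
            have hZ : collD false (d :: m) ≠ [] := collD_false_ne_nil d m
            rw [stripR_cons c ('.' :: collD false (d :: m)) (by simp),
                stripR_cons '.' _ hZ, hIH]
            have hwne : wordsOf (d :: m) ≠ [] := by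
              obtain ⟨h0, t, _, hs2⟩ := split1_cons_ne d m hdne
              simp [wordsOf, hs2]
            rcases hw : wordsOf (d :: m) with _ | ⟨w, ws⟩
            · exact absurd hw hwne
            · simp [jn]
        · -- l = c :: c' :: r', c' not a dot
          have hIH := ih (c' :: r') (by simp at hn ⊢; omega) (by simpa using hc')
          rw [collD_false_cons]
          rw [show (c == '.') = false by simp [hc]]
          rw [stripR_cons c _ (collD_false_ne_nil c' r'), hIH]
          obtain ⟨h0, t, hs1, hs2⟩ := split1_cons_ne c' r' hc'
          obtain ⟨h1, t1, hs3, hs4⟩ := split1_cons_ne c (c' :: r') hc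
          rw [hs2] at hs3
          injection hs3 with e1 e2
          subst e1; subst e2
          rw [show wordsOf (c :: c' :: r') = (c :: c' :: h0) :: t.filter (fun p => p ≠ []) by
                simp [wordsOf, hs4],
              show wordsOf (c' :: r') = (c' :: h0) :: t.filter (fun p => p ≠ []) by
                simp [wordsOf, hs2]]
          exact (jn_cons_head c (c' :: h0) _).symm

-- the A loop over indices equals collD with the wraparound previous char
lemma loop_suffix (cs : List Char) : ∀ (j k : Nat) (acc : List Char),
    j = cs.length - (k + 1) → k < cs.length →
    (PySem.List.pyRange ((k : Int) + 1) (cs.length : Int) 1).foldl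
      (fun a i =>
        if PySem.List.pyGetD cs i ' ' = PySem.List.pyGetD cs (i - 1) ' ' ∧
           PySem.List.pyGetD cs i ' ' = '.' then a
        else a ++ [PySem.List.pyGetD cs i ' ']) acc
      = acc ++ collD (cs.getD k ' ' == '.') (cs.drop (k + 1)) := by
  intro j
  induction j with
  | zero =>
    intro k acc hj hk
    have hlen : k + 1 = cs.length := by omega
    rw [PySem.List.pyRange_one_eq_nil (by omega)]
    simp [List.drop_eq_nil_of_le (by omega : cs.length ≤ k + 1), collD]
  | succ n ihn =>
    intro k acc hj hk
    have hk1 : k + 1 < cs.length := by omega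
    rw [PySem.List.pyRange_one_cons (by exact_mod_cast by omega : (k : Int) + 1 < (cs.length : Int))]
    rw [List.foldl_cons]
    have e1 : PySem.List.pyGetD cs ((k : Int) + 1) ' ' = cs.getD (k + 1) ' ' := by
      rw [show ((k : Int) + 1) = ((k + 1 : Nat) : Int) by push_cast; ring]
      exact PySem.List.pyGetD_natCast cs (k + 1) ' '
    have e2 : PySem.List.pyGetD cs ((k : Int) + 1 - 1) ' ' = cs.getD k ' ' := by
      rw [show ((k : Int) + 1 - 1) = ((k : Nat) : Int) by push_cast; ring]
      exact PySem.List.pyGetD_natCast cs k ' '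
    have hrec := ihn (k + 1)
      (if cs.getD (k + 1) ' ' = cs.getD k ' ' ∧ cs.getD (k + 1) ' ' = '.' then acc
       else acc ++ [cs.getD (k + 1) ' ']) (by omega) hk1
    rw [e1, e2]
    push_cast at hrec
    rw [hrec]
    have hdrop : cs.drop (k + 1) = cs.getD (k + 1) ' ' :: cs.drop (k + 2) := by
      rw [List.getD_eq_getElem cs ' ' hk1, List.drop_eq_getElem_cons hk1]
    rw [hdrop]
    by_cases hcond : cs.getD (k + 1) ' ' = cs.getD k ' ' ∧ cs.getD (k + 1) ' ' = '.'
    · rw [if_pos hcond]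
      have hb : (cs.getD k ' ' == '.') = true := by
        rw [beq_iff_eq, ← hcond.1]; exact hcond.2
      rw [hcond.2, hb, collD_true_dot]
      norm_num
    · rw [if_neg hcond]
      have hthis : collD (cs.getD k ' ' == '.') (cs.getD (k + 1) ' ' :: cs.drop (k + 2))
          = cs.getD (k + 1) ' ' :: collD (cs.getD (k + 1) ' ' == '.') (cs.drop (k + 2)) := by
        cases hb0 : (cs.getD k ' ' == '.') with
        | false => exact collD_false_cons _ _
        | true =>
          have hg1 : cs.getD (k + 1) ' ' ≠ '.' := by
            intro hg; exact hcond ⟨by rw [hg, beq_iff_eq.mp hb0], hg⟩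
          generalize cs.getD (k + 1) ' ' = g1 at hg1 ⊢
          simp [collD, hg1]
      rw [hthis, ← List.append_cons]

lemma loop_eq (cs : List Char) (h : cs ≠ []) :
    (PySem.List.pyRange 0 (cs.length : Int) 1).foldl
      (fun a i =>
        if PySem.List.pyGetD cs i ' ' = PySem.List.pyGetD cs (i - 1) ' ' ∧
           PySem.List.pyGetD cs i ' ' = '.' then a
        else a ++ [PySem.List.pyGetD cs i ' ']) []
    = collD (decide (cs.getLast h = '.')) cs := by
  have hlen : 0 < cs.length := List.length_pos_iff.mpr h
  rw [PySem.List.pyRange_one_cons (by exact_mod_cast hlen)]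
  rw [List.foldl_cons]
  have e1 : PySem.List.pyGetD cs (0 : Int) ' ' = cs.getD 0 ' ' := by
    simpa using PySem.List.pyGetD_natCast cs 0 ' '
  have e2 : PySem.List.pyGetD cs ((0 : Int) - 1) ' ' = cs.getLast h := by
    rw [show ((0 : Int) - 1) = (-1 : Int) by ring]
    exact PySem.List.pyGetD_neg_one cs ' ' h
  rw [e1, e2]
  have hls := loop_suffix cs (cs.length - 1) 0
    (if cs.getD 0 ' ' = cs.getLast h ∧ cs.getD 0 ' ' = '.' then []
     else [] ++ [cs.getD 0 ' ']) rfl hlen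
  rw [show ((0 : Nat) : Int) + 1 = (0 : Int) + 1 by norm_num] at hls
  rw [hls]
  obtain ⟨c0, rest, hcs⟩ := List.exists_cons_of_ne_nil h
  subst hcs
  have hget0 : (c0 :: rest).getD 0 ' ' = c0 := rfl
  have hdrop1 : (c0 :: rest).drop 1 = rest := rfl
  rw [hget0, hdrop1]
  by_cases hcond : c0 = (c0 :: rest).getLast h ∧ c0 = '.'
  · rw [if_pos hcond]
    have hL : (c0 :: rest).getLast h = '.' := hcond.1 ▸ hcond.2
    rw [show (decide ((c0 :: rest).getLast h = '.')) = true by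
      simp [hL]]
    rw [show collD true (c0 :: rest) = collD true rest by
      simp [collD, hcond.2]]
    rw [show (c0 == '.') = true by simp [hcond.2]]
    simp
  · rw [if_neg hcond]
    rw [show collD (decide ((c0 :: rest).getLast h = '.')) (c0 :: rest)
          = if (decide ((c0 :: rest).getLast h = '.')) = true ∧ c0 = '.'
            then collD true rest else c0 :: collD (c0 == '.') rest from rfl]
    rw [if_neg]
    · simp
    · intro ⟨hb, hdot⟩
      have hL : (c0 :: rest).getLast h = '.' := of_decide_eq_true hb
      exact hcond ⟨hdot.trans hL.symm, hdot⟩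

lemma strip1_eq (a : List Char) :
    (if a.length ≠ 0 ∧ PySem.List.pyGetD a 0 ' ' = '.'
     then PySem.List.slice a (some 1) none else a) = stripL a := by
  cases a with
  | nil => simp [stripL]
  | cons c r =>
    by_cases h : c = '.'
    · simp [PySem.List.pyGetD_zero_cons, h, PySem.List.slice_from, stripL]
    · simp [PySem.List.pyGetD_zero_cons, h, stripL]

lemma strip2_eq (a : List Char) :
    (if a.length ≠ 0 ∧ PySem.List.pyGetD a (-1) ' ' = '.'
     then PySem.List.slice a none (some (-1)) else a) = stripR a := by
  cases ha : a with
  | nil => simp [stripR]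
  | cons c r =>
    have hne : a ≠ [] := by rw [ha]; simp
    rw [← ha]
    rw [PySem.List.pyGetD_neg_one a ' ' hne]
    by_cases h : a.getLast hne = '.'
    · rw [if_pos ⟨by rw [ha]; simp, h⟩]
      rw [show stripR a = a.dropLast by
        simp [stripR, List.getLast?_eq_getLast_of_ne_nil hne, h]]
      simp [PySem.List.slice, List.dropLast_eq_take]
    · rw [if_neg (by rintro ⟨_, hh⟩; exact h hh)]
      simp [stripR, List.getLast?_eq_getLast_of_ne_nil hne, h]

lemma intercalate_jn : ∀ (ws : List (List Char)), List.intercalate ['.'] ws = jn ws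
  | [] => by simp [jn, List.intercalate, List.intersperse]
  | [w] => by simp [jn, List.intercalate, List.intersperse]
  | w :: v :: t => by
    rw [show List.intercalate ['.'] (w :: v :: t)
          = w ++ '.' :: List.intercalate ['.'] (v :: t) by
        simp [List.intercalate, List.intersperse]]
    rw [intercalate_jn (v :: t)]
    rfl

lemma alt_eq (x : String) :
    step34_alt x = String.ofList (jn (wordsOf x.toList)) := by
  unfold step34_alt
  rw [show PySem.Str.split? x "." = some ((split1 x.toList).map String.ofList) by
    simp [PySem.Str.split?, PySem.Chars.split?,
      show (".":String).toList = ['.'] from rfl, splitOn_eq_split1]]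
  rw [Option.getD_some, List.filter_map]
  rw [show ((split1 x.toList).filter ((fun p => decide (p ≠ "")) ∘ String.ofList))
        = wordsOf x.toList by
    unfold wordsOf
    apply List.filter_congr
    intro w _
    simp [Function.comp]]
  rw [PySem.Str.join]
  congr 1
  rw [List.map_map]
  rw [show String.toList ∘ String.ofList = id by
    funext l; simp]
  rw [List.map_id]
  rw [show PySem.Chars.join (".":String).toList (wordsOf x.toList)
        = List.intercalate ['.'] (wordsOf x.toList) from rfl]
  exact intercalate_jn _

theorem main_eq (x : String) : step34 x = step34_alt x := by
  rw [alt_eq]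
  unfold step34
  simp only [strip1_eq, strip2_eq]
  cases hcs : x.toList with
  | nil =>
    rw [show ((List.length ([] : List Char) : Int)) = 0 from rfl]
    rw [PySem.List.pyRange_one_eq_nil (by omega)]
    simp [stripL, stripR, wordsOf, split1, jn]
  | cons c r =>
    have hne : x.toList ≠ [] := by rw [hcs]; simp
    rw [← hcs]
    rw [loop_eq x.toList hne]
    rw [stripL_collD]
    have hhead : (dropDots x.toList).head? ≠ some '.' := by
      rcases hd : dropDots x.toList with _ | ⟨d, m⟩
      · simp
      · simpa using head_dropDots x.toList d m hd
    rw [core (dropDots x.toList).length (dropDots x.toList) le_rfl hhead]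
    rw [words_dropDots]

-- ===== VERDICT (by name: the statement is the Claim_ definition above) =====
theorem step34_spec : Claim_equal_step34 := by
  intro x _
  unfold Spec_step34
  exact main_eq x
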